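-- pv_equiv track=rewrite | github.com/Codechef-SRM-NCR-Chapter/30-DaysOfCode-March-2021 | answers/Khushi/Day 24/Question 2.py | countMinOperations
-- ===== SOURCE A (Python) =====
-- def countMinOperations(k,n):
--     r=0
--     while (True):
--         countZero=0
--         i=0
--         while(i<n):
--             if((k[i] & 1)>0):
--                 break
--             elif(k[i]==0):
--                 countZero+=1
--             i+=1
--         if(countZero==n):
--             return r
--         if(i==n):
--             for j in range(n):
--                 k[j]=k[j]//2
--             r+=1
--         for j in range(i,n):
--             if(k[j] & 1):
--                 k[j]-=1
--                 r+=1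
-- ===== SOURCE B (Python) =====
-- def countMinOperations(k, n):
--     # One pass: total popcount of the first n values, plus (max bit_length - 1)
--     # halvings when any value is nonzero. (Does not mutate k, unlike A.)
--     ones = 0
--     maxbits = 0
--     for x in k[:n]:
--         ones += bin(x).count('1')
--         maxbits = max(maxbits, x.bit_length())
--     return ones + (maxbits - 1 if maxbits > 0 else 0)
-- ===== Notes on version B (the rewrite author's own statement) =====
-- stated objective: simpler
-- what changed: Replaces A's simulation loop (repeatedly scanning the array, decrementing odd entries and halving all entries until everything is zero) by a closed-form single pass: answer = sum of popcounts of k[:n] plus (max bit_length - 1, or 0 if all zero); B also does not mutate k.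
import Mathlib
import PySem

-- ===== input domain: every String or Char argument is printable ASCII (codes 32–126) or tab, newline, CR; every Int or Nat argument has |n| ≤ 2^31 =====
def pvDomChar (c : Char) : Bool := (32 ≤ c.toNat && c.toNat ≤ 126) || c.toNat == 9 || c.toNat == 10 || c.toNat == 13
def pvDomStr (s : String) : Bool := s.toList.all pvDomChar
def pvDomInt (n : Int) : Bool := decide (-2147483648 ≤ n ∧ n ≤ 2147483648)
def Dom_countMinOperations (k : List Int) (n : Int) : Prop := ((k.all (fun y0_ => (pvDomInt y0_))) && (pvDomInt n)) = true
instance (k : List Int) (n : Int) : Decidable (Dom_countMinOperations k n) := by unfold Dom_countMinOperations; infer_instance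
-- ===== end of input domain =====

-- B replaces A's zero-out simulation loop by a single-pass closed form (sum of popcounts
-- + max bit_length - 1); equivalence of RETURN values only: A mutates k in place, B does not.


-- ===== PORT A =====
-- inner 'while(i<n)' scan: returns (countZero, i) — zeros seen before the first odd
-- element, and the index of that first odd element (list length if none).
def pvScanA : List Int → Int × Int
  | [] => (0, 0)
  | x :: t =>
    if PySem.Int.band x 1 > 0 then (0, 0)
    else
      let p := pvScanA t
      ((if x = 0 then 1 else 0) + p.1, 1 + p.2)

-- 'for j in range(i,n): if k[j]&1: k[j]-=1; r+=1' on the suffix from i: new suffix + r increment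
def pvSubA : List Int → List Int × Int
  | [] => ([], 0)
  | x :: t =>
    let p := pvSubA t
    if PySem.Int.band x 1 ≠ 0 then ((x - 1) :: p.1, p.2 + 1) else (x :: p.1, p.2)

-- the 'while True' loop of A; fuel only makes it total (unreachable under Pre_, where
-- each iteration strictly decreases the sum of the list).
def pvLoopA : Nat → List Int → Int → Int → Int
  | 0, _, _, r => r
  | f + 1, xs, n, r =>
    let s := pvScanA xs
    if s.1 = n then r
    else if s.2 = n then
      pvLoopA f (xs.map (fun x => PySem.Int.floordiv x 2)) n (r + 1)
    else
      let q := pvSubA (xs.drop s.2.toNat)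
      pvLoopA f (xs.take s.2.toNat ++ q.1) n (r + q.2)

-- A only ever reads/writes k[0..n-1] (all its loops are bounded by n), so the state is
-- that prefix; fuel sum+1 suffices since every non-returning iteration decreases the sum.
def countMinOperations (k : List Int) (n : Int) : Int :=
  let ks := k.take n.toNat
  pvLoopA (ks.sum + 1).toNat ks n 0

-- ===== PORT B =====
def countMinOperations_alt (k : List Int) (n : Int) : Int :=
  let p := (PySem.List.slice k none (some n)).foldl
    (fun (acc : Int × Int) x =>
      (acc.1 + (PySem.Int.bitCount x : Int), max acc.2 (PySem.Int.bitLength x : Int)))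
    (0, 0)
  p.1 + (if p.2 > 0 then p.2 - 1 else 0)

-- ===== PRECONDITION & SPEC =====
-- Exactly the inputs on which A returns: A raises IndexError when n > len(k) and
-- diverges when n < 0 or some of k[:n] is negative.
def Pre_countMinOperations (k : List Int) (n : Int) : Prop :=
  0 ≤ n ∧ n ≤ (k.length : Int) ∧ ∀ x ∈ k.take n.toNat, 0 ≤ x
instance (k : List Int) (n : Int) : Decidable (Pre_countMinOperations k n) := by
  unfold Pre_countMinOperations; infer_instance

def pvWitness_countMinOperations : List Int × Int := ([3, 4, 0], 3)

def Spec_countMinOperations (k : List Int) (n : Int) (out : Int) : Prop :=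
  out = countMinOperations_alt k n
instance (k : List Int) (n : Int) (out : Int) : Decidable (Spec_countMinOperations k n out) := by
  unfold Spec_countMinOperations; infer_instance

-- ===== CLAIM (what is proved, stated in full; the proofs are below) =====
def Claim_equal_countMinOperations : Prop :=
  ∀ (k : List Int) (n : Int), Dom_countMinOperations k n → Pre_countMinOperations k n →
    Spec_countMinOperations k n (countMinOperations k n)

-- ===== LEMMAS AND PROOFS =====

-- proof-side abbreviations
def bcI (x : Int) : Int := (PySem.Int.bitCount x : Int)
def blI (x : Int) : Int := (PySem.Int.bitLength x : Int)
def onesOf (xs : List Int) : Int := (xs.map bcI).sum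
def mbOf : List Int → Int
  | [] => 0
  | x :: t => max (blI x) (mbOf t)
def clampM (m : Int) : Int := if m > 0 then m - 1 else 0

lemma blI_nonneg (x : Int) : 0 ≤ blI x := by simp [blI]
lemma mbOf_nonneg (xs : List Int) : 0 ≤ mbOf xs := by
  induction xs with
  | nil => simp [mbOf]
  | cons x t ih => have := blI_nonneg x; simp only [mbOf]; omega

lemma onesOf_append (a b : List Int) : onesOf (a ++ b) = onesOf a + onesOf b := by
  simp [onesOf]
lemma mbOf_append (a b : List Int) : mbOf (a ++ b) = max (mbOf a) (mbOf b) := by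
  induction a with
  | nil => have := mbOf_nonneg b; simp [mbOf]; omega
  | cons x t ih => simp only [List.cons_append, mbOf, ih]; omega

-- parity bridge: k & 1 is k % 2
lemma band_one_mem (x : Int) : PySem.Int.band x 1 = PySem.Int.mod x 2 := PySem.Int.band_one x
lemma even_of_not_band (x : Int) (h : ¬ PySem.Int.band x 1 > 0) : PySem.Int.mod x 2 = 0 := by
  have h1 := PySem.Int.mod_nonneg x (b := 2) (by omega)
  have h2 := PySem.Int.mod_lt x (b := 2) (by omega)
  rw [band_one_mem] at h; omega
lemma odd_of_band (x : Int) (h : PySem.Int.band x 1 ≠ 0) : PySem.Int.mod x 2 = 1 := by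
  have h1 := PySem.Int.mod_nonneg x (b := 2) (by omega)
  have h2 := PySem.Int.mod_lt x (b := 2) (by omega)
  rw [band_one_mem] at h; omega

-- bitCount / bitLength arithmetic on nonnegative ints
lemma bc_cast (x : Int) (h0 : 0 < x) :
    bcI x = ((PySem.Int.mod x 2).toNat : Int) + bcI (PySem.Int.floordiv x 2) := by
  have h := PySem.Int.bitCount_of_pos (n := x) h0
  simp only [bcI, h]; push_cast; ring
lemma bl_cast (x : Int) (h0 : 0 < x) :
    blI x = blI (PySem.Int.floordiv x 2) + 1 := by
  have h := PySem.Int.bitLength_of_pos (n := x) h0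
  simp only [blI, h]; push_cast; ring
lemma floordiv_two_facts (x : Int) :
    PySem.Int.floordiv x 2 * 2 + PySem.Int.mod x 2 = x ∧
    0 ≤ PySem.Int.mod x 2 ∧ PySem.Int.mod x 2 < 2 :=
  ⟨PySem.Int.floordiv_mul_add_mod x 2, PySem.Int.mod_nonneg x (by omega),
   PySem.Int.mod_lt x (by omega)⟩
lemma bcI_even (x : Int) (hx : 0 ≤ x) (he : PySem.Int.mod x 2 = 0) :
    bcI (PySem.Int.floordiv x 2) = bcI x := by
  rcases eq_or_lt_of_le hx with h0 | h0
  · have : x = 0 := h0.symm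
    subst this; decide
  · have h := bc_cast x h0
    omega
lemma bcI_odd_pred (x : Int) (hx : 0 ≤ x) (ho : PySem.Int.mod x 2 = 1) :
    bcI (x - 1) + 1 = bcI x := by
  have hx' := bc_cast x (by have := (floordiv_two_facts x).1; omega)
  rcases eq_or_lt_of_le (show (1:Int) ≤ x by have := (floordiv_two_facts x).1; omega) with h1 | h1
  · have hx1 : x = 1 := h1.symm
    subst hx1
    have e0 : PySem.Int.floordiv (1:Int) 2 = 0 := by decide
    rw [e0] at hx'
    have e1 : bcI ((1:Int) - 1) = bcI 0 := by norm_num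
    rw [e1]
    have e2 : bcI (0:Int) = 0 := by decide
    omega
  · -- x odd > 1: x-1 > 0 even, (x-1)//2 = x//2
    obtain ⟨d1, d2, d3⟩ := floordiv_two_facts (x - 1)
    have hd1 : PySem.Int.floordiv (x - 1) 2 = PySem.Int.floordiv x 2 := by
      have := (floordiv_two_facts x).1; omega
    have hx1 := bc_cast (x - 1) (by omega)
    rw [hd1] at hx1
    have hx0 := (floordiv_two_facts x).1
    omega
lemma blI_halve (x : Int) (hx : 0 ≤ x) :
    blI (PySem.Int.floordiv x 2) = max (blI x - 1) 0 := by
  rcases eq_or_lt_of_le hx with h0 | h0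
  · have : x = 0 := h0.symm
    subst this; decide
  · have h := bl_cast x h0
    have hn := blI_nonneg (PySem.Int.floordiv x 2)
    omega
lemma blI_odd_pred (x : Int) (hx : 0 ≤ x) (ho : PySem.Int.mod x 2 = 1) :
    blI (x - 1) ≤ blI x ∧ (2 ≤ blI x → blI (x - 1) = blI x) := by
  have hdm := (floordiv_two_facts x).1
  rcases eq_or_lt_of_le (show (1:Int) ≤ x by omega) with h1 | h1
  · have hx1 : x = 1 := h1.symm
    subst hx1; constructor
    · decide
    · intro h; exfalso; revert h; decide
  · obtain ⟨d1, d2, d3⟩ := floordiv_two_facts (x - 1)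
    have hd1 : PySem.Int.floordiv (x - 1) 2 = PySem.Int.floordiv x 2 := by omega
    have e1 := bl_cast (x - 1) (by omega)
    have e2 := bl_cast x (by omega)
    rw [hd1] at e1
    omega
lemma blI_ge_two (x : Int) (hx : 2 ≤ x) : 2 ≤ blI x := by
  have e := bl_cast x (by omega)
  obtain ⟨d1, d2, d3⟩ := floordiv_two_facts x
  have hdpos : 0 < PySem.Int.floordiv x 2 := by omega
  have e2 := bl_cast (PySem.Int.floordiv x 2) hdpos
  have := blI_nonneg (PySem.Int.floordiv (PySem.Int.floordiv x 2) 2)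
  omega
lemma blI_le_mbOf (xs : List Int) (x : Int) (hx : x ∈ xs) : blI x ≤ mbOf xs := by
  induction xs with
  | nil => cases hx
  | cons y t ih =>
    rcases List.mem_cons.mp hx with h | h
    · subst h; simp only [mbOf]; omega
    · have := ih h; simp only [mbOf]; omega

-- scan facts
lemma scan_nonneg (xs : List Int) : 0 ≤ (pvScanA xs).1 ∧ 0 ≤ (pvScanA xs).2 := by
  induction xs with
  | nil => simp [pvScanA]
  | cons x t ih =>
    simp only [pvScanA]
    split
    · simp
    · constructor <;> [split <;> omega; omega]
lemma scan_le_length (xs : List Int) :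
    (pvScanA xs).1 ≤ (xs.length : Int) ∧ (pvScanA xs).2 ≤ (xs.length : Int) := by
  induction xs with
  | nil => simp [pvScanA]
  | cons x t ih =>
    simp only [pvScanA, List.length_cons]
    split
    · push_cast; simp; omega
    · push_cast at *
      constructor <;> [split <;> omega; omega]
lemma scan_cz_all_zero (xs : List Int) (h : (pvScanA xs).1 = (xs.length : Int)) :
    ∀ x ∈ xs, x = 0 := by
  induction xs with
  | nil => simp
  | cons x t ih =>
    simp only [pvScanA, List.length_cons] at h
    intro y hy
    by_cases hb : PySem.Int.band x 1 > 0
    · rw [if_pos hb] at h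
      exfalso; push_cast at h; omega
    · rw [if_neg hb] at h
      have hle := (scan_le_length t).1
      by_cases hx0 : x = 0
      · rw [if_pos hx0] at h
        push_cast at h hle
        have hall := ih (by omega)
        rcases List.mem_cons.mp hy with h' | h'
        · omega
        · exact hall y h'
      · rw [if_neg hx0] at h
        exfalso; push_cast at h hle; omega
lemma scan_all_zero (xs : List Int) (h : ∀ x ∈ xs, x = 0) :
    pvScanA xs = ((xs.length : Int), (xs.length : Int)) := by
  induction xs with
  | nil => simp [pvScanA]
  | cons x t ih =>
    have hx : x = 0 := h x (by simp)
    subst hx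
    have hb : ¬ PySem.Int.band (0:Int) 1 > 0 := by decide
    simp only [pvScanA, if_neg hb, ih (fun y hy => h y (List.mem_cons_of_mem _ hy)),
      List.length_cons]
    push_cast
    rw [Prod.mk.injEq]
    exact ⟨by omega, by omega⟩
lemma scan_i_all_even (xs : List Int) (h : (pvScanA xs).2 = (xs.length : Int)) :
    ∀ x ∈ xs, PySem.Int.mod x 2 = 0 := by
  induction xs with
  | nil => simp
  | cons x t ih =>
    simp only [pvScanA, List.length_cons] at h
    intro y hy
    by_cases hb : PySem.Int.band x 1 > 0
    · rw [if_pos hb] at h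
      exfalso; push_cast at h; omega
    · rw [if_neg hb] at h
      simp only at h
      push_cast at h
      rcases List.mem_cons.mp hy with h' | h'
      · subst h'; exact even_of_not_band y hb
      · exact ih (by omega) y h'
lemma scan_drop_odd (xs : List Int) (h : (pvScanA xs).2 ≠ (xs.length : Int)) :
    ∃ y t, xs.drop (pvScanA xs).2.toNat = y :: t ∧ PySem.Int.band y 1 ≠ 0 := by
  induction xs with
  | nil => simp [pvScanA] at h
  | cons x t ih =>
    by_cases hb : PySem.Int.band x 1 > 0
    · refine ⟨x, t, ?_, by omega⟩
      simp [pvScanA, if_pos hb]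
    · have hsc : (pvScanA (x :: t)).2 = 1 + (pvScanA t).2 := by
        simp [pvScanA, if_neg hb]
      have hnn := (scan_nonneg t).2
      have h' : (pvScanA t).2 ≠ (t.length : Int) := by
        simp only [List.length_cons] at h; rw [hsc] at h; push_cast at h; omega
      obtain ⟨y, t', hdrop, hodd⟩ := ih h'
      refine ⟨y, t', ?_, hodd⟩
      rw [hsc]
      have he : (1 + (pvScanA t).2).toNat = (pvScanA t).2.toNat + 1 := by omega
      rw [he, List.drop_succ_cons]
      exact hdrop

-- subtract-pass facts
lemma sub_facts (l : List Int) (hl : ∀ x ∈ l, 0 ≤ x) :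
    (pvSubA l).1.length = l.length ∧
    (∀ x ∈ (pvSubA l).1, 0 ≤ x) ∧
    0 ≤ (pvSubA l).2 ∧
    (pvSubA l).1.sum = l.sum - (pvSubA l).2 ∧
    onesOf (pvSubA l).1 = onesOf l - (pvSubA l).2 ∧
    mbOf (pvSubA l).1 ≤ mbOf l ∧
    (2 ≤ mbOf l → mbOf (pvSubA l).1 = mbOf l) := by
  induction l with
  | nil => simp [pvSubA, onesOf, mbOf]
  | cons x t ih =>
    have hx : 0 ≤ x := hl x (by simp)
    obtain ⟨ihlen, ihnn, ihc, ihsum, ihones, ihmb, ihmb2⟩ :=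
      ih (fun y hy => hl y (List.mem_cons_of_mem _ hy))
    by_cases hb : PySem.Int.band x 1 ≠ 0
    · have ho := odd_of_band x hb
      have hbc := bcI_odd_pred x hx ho
      have hbl := blI_odd_pred x hx ho
      have hxpos : 0 < x := by have := (floordiv_two_facts x).1; have := (floordiv_two_facts x).2.1; omega
      simp only [pvSubA, if_pos hb, List.length_cons, List.sum_cons, onesOf, mbOf,
        List.map_cons] at *
      refine ⟨by omega, ?_, by omega, by omega, by omega, ?_, ?_⟩
      · intro y hy
        rcases List.mem_cons.mp hy with h' | h'
        · omega
        · exact ihnn y h'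
      · have := blI_nonneg (x - 1); omega
      · have h1 := blI_nonneg (x - 1)
        have h2 := blI_nonneg x
        have h3 := mbOf_nonneg t
        have h4 := mbOf_nonneg (pvSubA t).1
        omega
    · simp only [pvSubA, if_neg hb, List.length_cons, List.sum_cons, onesOf, mbOf,
        List.map_cons] at *
      refine ⟨by omega, ?_, by omega, by omega, by omega, by omega, by omega⟩
      intro y hy
      rcases List.mem_cons.mp hy with h' | h'
      · omega
      · exact ihnn y h'

lemma sub_count_pos (y : Int) (t : List Int) (hb : PySem.Int.band y 1 ≠ 0) :
    1 ≤ (pvSubA (y :: t)).2 := by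
  have hnn : 0 ≤ (pvSubA t).2 := by
    induction t with
    | nil => simp [pvSubA]
    | cons z u ih => simp only [pvSubA]; split <;> omega
  simp only [pvSubA, if_pos hb]
  omega

-- halving-pass facts
lemma halve_facts (l : List Int) (hl : ∀ x ∈ l, 0 ≤ x) :
    (∀ x ∈ l.map (fun x => PySem.Int.floordiv x 2), 0 ≤ x) ∧
    mbOf (l.map (fun x => PySem.Int.floordiv x 2)) = max (mbOf l - 1) 0 ∧
    ((∀ x ∈ l, PySem.Int.mod x 2 = 0) →
      onesOf (l.map (fun x => PySem.Int.floordiv x 2)) = onesOf l) ∧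
    (l.map (fun x => PySem.Int.floordiv x 2)).sum ≤ l.sum := by
  induction l with
  | nil => simp [onesOf, mbOf]
  | cons x t ih =>
    have hx : 0 ≤ x := hl x (by simp)
    obtain ⟨ihnn, ihmb, ihones, ihsum⟩ := ih (fun y hy => hl y (List.mem_cons_of_mem _ hy))
    obtain ⟨d1, d2, d3⟩ := floordiv_two_facts x
    have hbl := blI_halve x hx
    have hmb0 := mbOf_nonneg t
    have hbl0 := blI_nonneg x
    refine ⟨?_, ?_, ?_, ?_⟩
    · intro y hy
      rcases List.mem_cons.mp hy with h' | h'
      · have h'' : y = PySem.Int.floordiv x 2 := h'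
        omega
      · exact ihnn y h'
    · simp only [List.map_cons, mbOf] at *
      omega
    · intro hev
      have hbc := bcI_even x hx (hev x (by simp))
      have := ihones (fun y hy => hev y (List.mem_cons_of_mem _ hy))
      simp only [List.map_cons, onesOf, List.sum_cons] at *
      omega
    · simp only [List.map_cons, List.sum_cons]
      omega

lemma halve_sum_lt (l : List Int) (hl : ∀ x ∈ l, 0 ≤ x) (y : Int) (hy : y ∈ l) (hy2 : 2 ≤ y) :
    (l.map (fun x => PySem.Int.floordiv x 2)).sum < l.sum := by
  induction l with
  | nil => cases hy
  | cons x t ih =>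
    have hx : 0 ≤ x := hl x (by simp)
    obtain ⟨d1, d2, d3⟩ := floordiv_two_facts x
    have hrest := (halve_facts t (fun z hz => hl z (List.mem_cons_of_mem _ hz))).2.2.2
    simp only [List.map_cons, List.sum_cons]
    rcases List.mem_cons.mp hy with h' | h'
    · subst h'; omega
    · have := ih (fun z hz => hl z (List.mem_cons_of_mem _ hz)) h'
      omega

lemma onesOf_zero (xs : List Int) (h : ∀ x ∈ xs, x = 0) : onesOf xs = 0 ∧ mbOf xs = 0 := by
  induction xs with
  | nil => simp [onesOf, mbOf]
  | cons x t ih =>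
    have hx : x = 0 := h x (by simp)
    subst hx
    obtain ⟨h1, h2⟩ := ih (fun y hy => h y (List.mem_cons_of_mem _ hy))
    have e1 : bcI (0:Int) = 0 := by decide
    have e2 : blI (0:Int) = 0 := by decide
    simp only [onesOf, mbOf, List.map_cons, List.sum_cons] at *
    omega

lemma clamp_eq (a m m' : Int) (hm' : 0 ≤ m') (h1 : m' ≤ m) (h2 : 2 ≤ m → m' = m) :
    clampM (max a m') = clampM (max a m) := by
  unfold clampM; split_ifs <;> omega

lemma clamp_halve (m : Int) (h : 2 ≤ m) : clampM (max (m - 1) 0) + 1 = clampM m := by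
  unfold clampM; split_ifs <;> omega

-- one fold of B's pass computes (popcount sum, running max of bit lengths)
lemma fold_pair (xs : List Int) (a b : Int) (hb : 0 ≤ b) :
    xs.foldl
      (fun (acc : Int × Int) x =>
        (acc.1 + (PySem.Int.bitCount x : Int), max acc.2 (PySem.Int.bitLength x : Int)))
      (a, b) = (a + onesOf xs, max b (mbOf xs)) := by
  induction xs generalizing a b with
  | nil => simp only [List.foldl_nil, onesOf, mbOf, List.map_nil, List.sum_nil]
           rw [Prod.mk.injEq]; exact ⟨by ring, by omega⟩
  | cons x t ih =>
    have hb' : 0 ≤ max b (PySem.Int.bitLength x : Int) := by omega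
    simp only [List.foldl_cons]
    rw [ih _ _ hb']
    simp only [onesOf, mbOf, List.map_cons, List.sum_cons]
    rw [Prod.mk.injEq]
    refine ⟨by simp only [bcI]; ring, by simp only [blI]; omega⟩

-- B's closed form over the prefix
lemma alt_closed (k : List Int) (n : Int) (hn : 0 ≤ n) :
    countMinOperations_alt k n = onesOf (k.take n.toNat) + clampM (mbOf (k.take n.toNat)) := by
  have hcast : n = ((n.toNat : Nat) : Int) := by omega
  have hslice : PySem.List.slice k none (some n) = k.take n.toNat := by
    conv_lhs => rw [hcast]
    exact PySem.List.slice_to_natCast k n.toNat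
  simp only [countMinOperations_alt]
  rw [hslice, fold_pair _ _ _ (by omega)]
  have := mbOf_nonneg (k.take n.toNat)
  have hmax : max (0:Int) (mbOf (k.take n.toNat)) = mbOf (k.take n.toNat) := by omega
  rw [hmax]
  simp only [clampM]
  ring

-- main loop invariant: with enough fuel, A's loop adds the closed form to r
lemma loopA_eq (f : Nat) : ∀ (xs : List Int) (n r : Int),
    (∀ x ∈ xs, 0 ≤ x) → ((xs.length : Int) = n) → (xs.sum < (f : Int)) →
    pvLoopA f xs n r = r + onesOf xs + clampM (mbOf xs) := by
  induction f with
  | zero =>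
    intro xs n r hnn hlen hf
    exact absurd (List.sum_nonneg hnn) (by push_cast at hf; omega)
  | succ f ih =>
    intro xs n r hnn hlen hf
    simp only [pvLoopA]
    by_cases h1 : (pvScanA xs).1 = n
    · rw [if_pos h1]
      obtain ⟨hz1, hz2⟩ := onesOf_zero xs (scan_cz_all_zero xs (by rw [hlen]; exact h1))
      have : clampM 0 = 0 := by decide
      rw [hz1, hz2, this]; ring
    · rw [if_neg h1]
      by_cases h2 : (pvScanA xs).2 = n
      · rw [if_pos h2]
        have heven := scan_i_all_even xs (by rw [hlen]; exact h2)
        have hnz : ∃ y ∈ xs, y ≠ 0 := by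
          by_contra hc
          push Not at hc
          have := scan_all_zero xs (fun x hx => by
            by_contra hx0; exact hx0 (hc x hx))
          apply h1
          rw [this, hlen]
        obtain ⟨y, hy, hy0⟩ := hnz
        have hy2 : 2 ≤ y := by
          have hdvd := (PySem.Int.mod_eq_zero_iff_dvd y 2).mp (heven y hy)
          have := hnn y hy
          omega
        have hmb2 : 2 ≤ mbOf xs := le_trans (blI_ge_two y hy2) (blI_le_mbOf xs y hy)
        obtain ⟨hnn', hmb', hones', hsum'⟩ := halve_facts xs hnn
        have hlt := halve_sum_lt xs hnn y hy hy2
        rw [ih _ n (r + 1) hnn' (by rw [List.length_map]; exact hlen) (by push_cast at hf ⊢; omega)]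
        rw [hmb', hones' heven, ← clamp_halve (mbOf xs) hmb2]
        ring
      · rw [if_neg h2]
        obtain ⟨y, t, hdrop, hodd⟩ := scan_drop_odd xs (by rw [hlen]; exact h2)
        have hnn_drop : ∀ x ∈ xs.drop (pvScanA xs).2.toNat, 0 ≤ x :=
          fun x hx => hnn x (List.drop_subset _ _ hx)
        have hnn_take : ∀ x ∈ xs.take (pvScanA xs).2.toNat, 0 ≤ x :=
          fun x hx => hnn x (List.take_subset _ _ hx)
        obtain ⟨slen, snn, scnn, ssum, sones, smb, smb2⟩ := sub_facts _ hnn_drop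
        have hc1 : 1 ≤ (pvSubA (xs.drop (pvScanA xs).2.toNat)).2 := by
          rw [hdrop]; exact sub_count_pos y t hodd
        have hsplit : xs.take (pvScanA xs).2.toNat ++ xs.drop (pvScanA xs).2.toNat = xs :=
          List.take_append_drop _ _
        have hnn' : ∀ x ∈ xs.take (pvScanA xs).2.toNat ++ (pvSubA (xs.drop (pvScanA xs).2.toNat)).1,
            0 ≤ x := by
          intro x hx
          rcases List.mem_append.mp hx with h' | h'
          · exact hnn_take x h'
          · exact snn x h'
        have hlentd : (xs.take (pvScanA xs).2.toNat).length +
            (xs.drop (pvScanA xs).2.toNat).length = xs.length := by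
          have hs := (scan_le_length xs).2
          simp only [List.length_take, List.length_drop]
          omega
        have hlen' : (((xs.take (pvScanA xs).2.toNat ++
            (pvSubA (xs.drop (pvScanA xs).2.toNat)).1).length : Nat) : Int) = n := by
          rw [List.length_append, slen, hlentd]
          exact hlen
        have hsplitSum : xs.sum = (xs.take (pvScanA xs).2.toNat).sum +
            (xs.drop (pvScanA xs).2.toNat).sum := by
          conv_lhs => rw [← hsplit]
          exact List.sum_append
        have hf' : (xs.take (pvScanA xs).2.toNat ++
            (pvSubA (xs.drop (pvScanA xs).2.toNat)).1).sum < ((f : Nat) : Int) := by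
          rw [List.sum_append, ssum]
          push_cast at hf ⊢
          omega
        rw [ih _ n _ hnn' hlen' hf']
        have hsplitOnes : onesOf xs = onesOf (xs.take (pvScanA xs).2.toNat) +
            onesOf (xs.drop (pvScanA xs).2.toNat) := by
          conv_lhs => rw [← hsplit]
          exact onesOf_append _ _
        have hsplitMb : mbOf xs = max (mbOf (xs.take (pvScanA xs).2.toNat))
            (mbOf (xs.drop (pvScanA xs).2.toNat)) := by
          conv_lhs => rw [← hsplit]
          exact mbOf_append _ _
        have hce := clamp_eq (mbOf (xs.take (pvScanA xs).2.toNat))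
          (mbOf (xs.drop (pvScanA xs).2.toNat)) (mbOf (pvSubA (xs.drop (pvScanA xs).2.toNat)).1)
          (mbOf_nonneg _) smb smb2
        rw [onesOf_append, mbOf_append, sones, hce, hsplitOnes, hsplitMb]
        ring

-- ===== VERDICT (by name: the statement is the Claim_ definition above) =====
theorem countMinOperations_spec : Claim_equal_countMinOperations := by
  intro k n hdom hpre
  obtain ⟨hn0, hnlen, hnnpre⟩ := hpre
  unfold Spec_countMinOperations
  have hlen : (((k.take n.toNat).length : Nat) : Int) = n := by
    rw [List.length_take]
    push_cast [Int.toNat_of_nonneg hn0]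
    omega
  have hsum0 : 0 ≤ (k.take n.toNat).sum := List.sum_nonneg hnnpre
  have hfuel : (k.take n.toNat).sum < ((((k.take n.toNat).sum + 1).toNat : Nat) : Int) := by omega
  simp only [countMinOperations]
  rw [loopA_eq _ _ n 0 hnnpre hlen hfuel, alt_closed k n hn0]
  ring
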